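-- pv_equiv track=rewrite | github.com/zkakskdk/NP-2025-202110343 | 빅데이터 실습/2-10.py | solution
-- ===== SOURCE A (Python) =====
-- def solution(N, M):
--     days = 0
--     stock = N
--     while stock > 0:
--         days += 1
--         stock -= 1
--         if days % M == 0:
--             stock += 1
--     return days
-- ===== SOURCE B (Python) =====
-- def solution(N, M):
--     # Closed form: stock depletes on the smallest day d with d - d//|M| >= N,
--     # which is d = N + (N - 1) // (|M| - 1); 0 if there is no stock to begin with.
--     if N <= 0:
--         return 0
--     m = abs(M)
--     return N + (N - 1) // (m - 1)
-- ===== Notes on version B (the rewrite author's own statement) =====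
-- stated objective: faster
-- what changed: Replaces the day-by-day simulation loop with the closed form N + (N-1)//(|M|-1) for the first day on which the stock is exhausted.
import Mathlib
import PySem

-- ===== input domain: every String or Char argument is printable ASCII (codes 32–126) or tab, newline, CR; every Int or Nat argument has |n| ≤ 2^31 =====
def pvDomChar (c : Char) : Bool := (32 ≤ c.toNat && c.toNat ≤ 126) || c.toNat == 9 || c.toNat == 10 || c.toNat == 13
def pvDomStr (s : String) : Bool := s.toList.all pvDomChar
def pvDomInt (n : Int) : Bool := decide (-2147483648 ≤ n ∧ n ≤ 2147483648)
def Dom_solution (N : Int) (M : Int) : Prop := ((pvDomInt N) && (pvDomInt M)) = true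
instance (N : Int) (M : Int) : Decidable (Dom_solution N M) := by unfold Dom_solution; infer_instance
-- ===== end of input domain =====

-- B replaces A's day-by-day simulation with the O(1) closed form N + (N-1)//(|M|-1).

-- ===== PORT A =====
-- while loop ported with fuel (2*N.toNat + 1 steps suffice on Pre_; the guard only makes it total)
def solLoop (M : Int) : Nat → Int → Int → Int
  | 0, days, _ => days
  | fuel + 1, days, stock =>
    if stock > 0 then
      let days' := days + 1
      let stock' := stock - 1
      let stock'' := if PySem.Int.mod days' M = 0 then stock' + 1 else stock'
      solLoop M fuel days' stock''
    else days

def solution (N : Int) (M : Int) : Int := solLoop M (2 * N.toNat + 1) 0 N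

-- ===== PORT B =====
def solution_alt (N : Int) (M : Int) : Int :=
  if N ≤ 0 then 0
  else
    let m : Int := |M|
    N + PySem.Int.floordiv (N - 1) (m - 1)

-- ===== PRECONDITION & SPEC =====
-- Pre_ excludes only inputs on which A does not return: N > 0 with M = 0 (ZeroDivisionError)
-- and N > 0 with |M| = 1 (replenishment every day: the while loop never terminates).
def Pre_solution (N : Int) (M : Int) : Prop := N ≤ 0 ∨ 2 ≤ |M|
instance (N : Int) (M : Int) : Decidable (Pre_solution N M) := by unfold Pre_solution; infer_instance
def pvWitness_solution : Int × Int := (5, 3)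
def Spec_solution (N : Int) (M : Int) (out : Int) : Prop := out = solution_alt N M
instance (N : Int) (M : Int) (out : Int) : Decidable (Spec_solution N M out) := by unfold Spec_solution; infer_instance

-- ===== CLAIM (what is proved, stated in full; the proofs are below) =====
def Claim_equal_solution : Prop := ∀ (N : Int) (M : Int), Dom_solution N M → Pre_solution N M → Spec_solution N M (solution N M)

-- ===== LEMMAS AND PROOFS =====

-- remaining days of the loop from a state with stock s and days ≡ r (mod |M|)
def solNeed (m s r : Int) : Int := if s ≤ 0 then 0 else s + (s - 1 + r) / (m - 1)

theorem solNeed_nonneg (m s r : Int) (hm : 2 ≤ m) (hr : 0 ≤ r) : 0 ≤ solNeed m s r := by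
  unfold solNeed
  split_ifs with h
  · exact le_refl 0
  · have h1 : 0 ≤ (s - 1 + r) / (m - 1) := Int.ediv_nonneg (by omega) (by omega)
    omega

theorem solLoop_succ (M : Int) (fuel : Nat) (days stock : Int) :
    solLoop M (fuel + 1) days stock =
      if stock > 0 then
        solLoop M fuel (days + 1)
          (if PySem.Int.mod (days + 1) M = 0 then stock - 1 + 1 else stock - 1)
      else days := rfl

theorem solLoop_eval (M : Int) (hm : 2 ≤ |M|) :
    ∀ (fuel : Nat) (days stock : Int), 0 ≤ days →
      solNeed |M| stock (days % |M|) ≤ (fuel : Int) →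
      solLoop M fuel days stock = days + solNeed |M| stock (days % |M|) := by
  intro fuel
  induction fuel with
  | zero =>
    intro days stock hd hfuel
    have h0 : 0 ≤ solNeed |M| stock (days % |M|) :=
      solNeed_nonneg _ _ _ hm (Int.emod_nonneg days (by omega))
    have hz : solNeed |M| stock (days % |M|) = 0 := by
      have : ((0:Nat) : Int) = 0 := rfl
      omega
    show days = days + solNeed |M| stock (days % |M|)
    omega
  | succ fuel ih =>
    intro days stock hd hfuel
    rw [solLoop_succ]
    by_cases hs : stock > 0
    · rw [if_pos hs]
      have hMne : M ≠ 0 := by intro h; rw [h] at hm; simp at hm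
      have hmpos : (0:Int) < |M| := by omega
      have hr0 : 0 ≤ days % |M| := Int.emod_nonneg days (by omega)
      have hrlt : days % |M| < |M| := Int.emod_lt_of_pos days hmpos
      have hed := Int.emod_add_mul_ediv days |M|
      -- the replenishment test is divisibility by |M|
      have hmodiff : (PySem.Int.mod (days + 1) M = 0) ↔ ((days + 1) % |M| = 0) := by
        rw [PySem.Int.mod_eq_zero_iff_dvd, ← abs_dvd]
        exact ⟨Int.emod_eq_zero_of_dvd, Int.dvd_of_emod_eq_zero⟩
      by_cases hcase : days % |M| = |M| - 1
      · -- replenish day: stock unchanged, residue resets to 0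
        have hdvd : (days + 1) % |M| = 0 := by
          apply Int.emod_eq_zero_of_dvd
          refine ⟨days / |M| + 1, ?_⟩
          rw [mul_add, mul_one]; omega
        rw [if_pos (hmodiff.mpr hdvd)]
        have hst : stock - 1 + 1 = stock := by omega
        rw [hst]
        have hneed : solNeed |M| stock ((days + 1) % |M|) =
            solNeed |M| stock (days % |M|) - 1 := by
          rw [hdvd, hcase]
          unfold solNeed
          split_ifs with h
          · omega
          · have hdd : (stock - 1 + (|M| - 1)) / (|M| - 1) = (stock - 1) / (|M| - 1) + 1 := by
              have := Int.add_mul_ediv_right (stock - 1) 1 (c := |M| - 1) (by omega)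
              simpa using this
            simp only [add_zero]
            omega
        have hfuel' : solNeed |M| stock ((days + 1) % |M|) ≤ (fuel : Int) := by
          rw [hneed]; push_cast at hfuel ⊢; omega
        rw [ih (days + 1) stock (by omega) hfuel', hneed]
        omega
      · -- ordinary day: stock decreases by one, residue advances
        have hstep : (days + 1) % |M| = days % |M| + 1 := by
          have h1 : days + 1 = (days % |M| + 1) + |M| * (days / |M|) := by omega
          rw [h1, Int.add_mul_emod_self_left]
          exact Int.emod_eq_of_lt (by omega) (by omega)
        have hmod : ¬ (PySem.Int.mod (days + 1) M = 0) := by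
          rw [hmodiff, hstep]; omega
        rw [if_neg hmod]
        have hneed : solNeed |M| (stock - 1) ((days + 1) % |M|) =
            solNeed |M| stock (days % |M|) - 1 := by
          rw [hstep]
          unfold solNeed
          split_ifs with h1 h2 h2
          · omega
          · -- stock = 1 : one more day empties it
            have hz : (stock - 1 + days % |M|) / (|M| - 1) = 0 := by
              apply Int.ediv_eq_zero_of_lt <;> omega
            omega
          · omega
          · have he : stock - 1 - 1 + (days % |M| + 1) = stock - 1 + days % |M| := by omega
            rw [he]; omega
        have hfuel' : solNeed |M| (stock - 1) ((days + 1) % |M|) ≤ (fuel : Int) := by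
          rw [hneed]; push_cast at hfuel ⊢; omega
        rw [ih (days + 1) (stock - 1) (by omega) hfuel', hneed]
        omega
    · rw [if_neg hs]
      have hz : solNeed |M| stock (days % |M|) = 0 := by
        unfold solNeed; rw [if_pos (by omega)]
      omega

-- ===== VERDICT (by name: the statement is the Claim_ definition above) =====
theorem solution_spec : Claim_equal_solution := by
  intro N M _ hpre
  unfold Spec_solution solution solution_alt
  by_cases hN : N ≤ 0
  · rw [if_pos hN]
    have ht : 2 * N.toNat + 1 = 1 := by omega
    rw [ht, solLoop_succ, if_neg (by omega)]
  · have hm : 2 ≤ |M| := by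
      rcases hpre with h | h
      · omega
      · exact h
    have hq : 0 ≤ (N - 1) / (|M| - 1) := Int.ediv_nonneg (by omega) (by omega)
    have hqle : (N - 1) / (|M| - 1) ≤ N - 1 := Int.ediv_le_self _ (by omega)
    have h0m : (0 : Int) % |M| = 0 := Int.zero_emod _
    have hneed : solNeed |M| N ((0:Int) % |M|) = N + (N - 1) / (|M| - 1) := by
      unfold solNeed; rw [h0m, if_neg hN, add_zero]
    have hfuel : solNeed |M| N ((0:Int) % |M|) ≤ ((2 * N.toNat + 1 : Nat) : Int) := by
      rw [hneed]; push_cast; omega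
    rw [solLoop_eval M hm (2 * N.toNat + 1) 0 N (le_refl 0) hfuel, hneed, if_neg hN]
    show 0 + (N + (N - 1) / (|M| - 1)) = N + PySem.Int.floordiv (N - 1) (|M| - 1)
    rw [PySem.Int.floordiv_eq_ediv_of_pos (by omega)]
    omega
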